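-- pv_equiv track=rewrite | github.com/scott-hornberger/idb | app/api/routes.py | mock_loop_list
-- ===== SOURCE A (Python) =====
-- from typing import Any, List, Callable
--
-- def mock_loop_list(li: List[Any], page: int, pagesize: int, maxsize: int):
--     # pylint: disable=invalid-name
--     assert page >= 0
--     assert pagesize > 0
--     assert maxsize > 0
--     assert page * pagesize < maxsize
--
--     first_entry = (page * pagesize) % len(li)
--     resultlist = li[first_entry: min(first_entry + pagesize, len(li))]
--     entries_left = max(0, pagesize - len(resultlist))
--     while entries_left > 0:
--         entries_to_add = min(len(li), entries_left)
--         resultlist += li[:entries_to_add]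
--         entries_left = entries_left - entries_to_add
--
--     assert len(resultlist) > 0
--     return resultlist
-- ===== SOURCE B (Python) =====
-- from typing import Any, List
--
-- def mock_loop_list(li: List[Any], page: int, pagesize: int, maxsize: int):
--     # pylint: disable=invalid-name
--     assert page >= 0
--     assert pagesize > 0
--     assert maxsize > 0
--     assert page * pagesize < maxsize
--
--     first_entry = (page * pagesize) % len(li)
--     reps = -(-(first_entry + pagesize) // len(li))  # ceil((first_entry + pagesize) / len(li))
--     result = (li * reps)[first_entry:first_entry + pagesize]
--
--     assert len(result) > 0
--     return result
-- ===== Notes on version B (the rewrite author's own statement) =====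
-- stated objective: simpler
-- what changed: Replaces the tail-slice plus append-while-loop accumulation with a ceiling-division repetition count followed by a single slice of the repeated list.
import Mathlib
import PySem

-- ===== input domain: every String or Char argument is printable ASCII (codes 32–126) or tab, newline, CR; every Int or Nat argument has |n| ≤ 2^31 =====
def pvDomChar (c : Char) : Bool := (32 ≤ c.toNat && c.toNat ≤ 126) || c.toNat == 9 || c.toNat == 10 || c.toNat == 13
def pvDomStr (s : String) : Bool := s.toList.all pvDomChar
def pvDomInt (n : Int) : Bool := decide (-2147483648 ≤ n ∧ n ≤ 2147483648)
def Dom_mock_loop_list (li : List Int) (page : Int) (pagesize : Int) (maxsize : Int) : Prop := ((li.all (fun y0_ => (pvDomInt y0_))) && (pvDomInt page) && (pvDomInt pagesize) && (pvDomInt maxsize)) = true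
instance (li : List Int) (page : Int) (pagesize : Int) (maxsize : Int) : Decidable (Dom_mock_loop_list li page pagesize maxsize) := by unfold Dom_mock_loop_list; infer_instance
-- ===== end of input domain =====

-- B replaces A's tail-slice + append-while-loop with a ceiling-division repetition
-- count and one slice of the repeated list (objective: simpler; same cost).


-- ===== PORT A =====
-- the while loop; entries_left is always a nonnegative int in Python, carried as Nat.
-- The `add = 0` guard (reachable only for empty li, where Python raised before the loop)
-- makes the recursion total.
def mockLoopA_loop (li : List Int) (acc : List Int) (left : Nat) : List Int :=
  if _h : left = 0 then acc
  else
    let add := min li.length left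
    if _h2 : add = 0 then acc
    else mockLoopA_loop li (acc ++ li.take add) (left - add)
termination_by left
decreasing_by omega

def mock_loop_list (li : List Int) (page : Int) (pagesize : Int) (maxsize : Int) : List Int :=
  let first_entry := PySem.Int.mod (page * pagesize) li.length
  let resultlist := PySem.List.slice li (some first_entry) (some (min (first_entry + pagesize) li.length))
  let entries_left := max 0 (pagesize - resultlist.length)
  mockLoopA_loop li resultlist entries_left.toNat

-- ===== PORT B =====
def mock_loop_list_alt (li : List Int) (page : Int) (pagesize : Int) (maxsize : Int) : List Int :=
  let first_entry := PySem.Int.mod (page * pagesize) li.length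
  let reps := -(PySem.Int.floordiv (-(first_entry + pagesize)) li.length)  -- -(-(x) // n) = ceil(x / n)
  PySem.List.slice ((List.replicate reps.toNat li).flatten) (some first_entry) (some (first_entry + pagesize))

-- ===== PRECONDITION & SPEC =====
-- Pre_ excludes exactly the inputs on which A raises: a failed assert, or empty li
-- (ZeroDivisionError at the `%`).
def Pre_mock_loop_list (li : List Int) (page : Int) (pagesize : Int) (maxsize : Int) : Prop :=
  0 ≤ page ∧ 0 < pagesize ∧ 0 < maxsize ∧ page * pagesize < maxsize ∧ li ≠ []
instance (li : List Int) (page : Int) (pagesize : Int) (maxsize : Int) : Decidable (Pre_mock_loop_list li page pagesize maxsize) := by unfold Pre_mock_loop_list; infer_instance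
def pvWitness_mock_loop_list : List Int × Int × Int × Int := ([1, 2, 3], 1, 2, 10)

def Spec_mock_loop_list (li : List Int) (page : Int) (pagesize : Int) (maxsize : Int) (out : List Int) : Prop := out = mock_loop_list_alt li page pagesize maxsize
instance (li : List Int) (page : Int) (pagesize : Int) (maxsize : Int) (out : List Int) : Decidable (Spec_mock_loop_list li page pagesize maxsize out) := by unfold Spec_mock_loop_list; infer_instance

-- ===== CLAIM (what is proved, stated in full; the proofs are below) =====
def Claim_equal_mock_loop_list : Prop := ∀ (li : List Int) (page : Int) (pagesize : Int) (maxsize : Int), Dom_mock_loop_list li page pagesize maxsize → Pre_mock_loop_list li page pagesize maxsize → Spec_mock_loop_list li page pagesize maxsize (mock_loop_list li page pagesize maxsize)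

-- ===== LEMMAS AND PROOFS =====

-- A's loop appends `left` cyclic elements: it equals acc ++ take left of enough copies of li.
theorem mockLoopA_loop_eq (li : List Int) (hli : li ≠ []) :
    ∀ (R : Nat) (acc : List Int) (left : Nat), left ≤ R * li.length →
      mockLoopA_loop li acc left = acc ++ ((List.replicate R li).flatten).take left := by
  have hn : 0 < li.length := List.length_pos_iff.mpr hli
  intro R
  induction R with
  | zero =>
    intro acc left hle
    have : left = 0 := by omega
    subst this
    rw [mockLoopA_loop]
    simp
  | succ R ih =>
    intro acc left hle
    by_cases h0 : left = 0
    · subst h0; rw [mockLoopA_loop]; simp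
    · rw [mockLoopA_loop]
      simp only [h0, dif_neg, not_false_iff]
      have hadd : min li.length left ≠ 0 := by omega
      simp only [hadd, dif_neg, not_false_iff]
      have hrep : (List.replicate (R + 1) li).flatten = li ++ (List.replicate R li).flatten := by
        simp [List.replicate_succ]
      by_cases hcase : li.length ≤ left
      · have hmin : min li.length left = li.length := by omega
        have hle' : left - li.length ≤ R * li.length := by
          rw [Nat.succ_mul] at hle; omega
        rw [hmin, List.take_length, ih (acc ++ li) (left - li.length) hle']
        rw [hrep, List.take_append, List.take_of_length_le hcase]
        simp
      · have hmin : min li.length left = left := by omega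
        rw [hmin, mockLoopA_loop]
        simp only [Nat.sub_self, dif_pos]
        rw [hrep, List.take_append]
        have : left - li.length = 0 := by omega
        rw [this]
        simp


theorem ports_agree (li : List Int) (page pagesize maxsize : Int)
    (hpage : 0 ≤ page) (hps : 0 < pagesize) (hli : li ≠ []) :
    mock_loop_list li page pagesize maxsize = mock_loop_list_alt li page pagesize maxsize := by
  have hn : 0 < li.length := List.length_pos_iff.mpr hli
  have hnz : (0 : Int) < (li.length : Int) := by exact_mod_cast hn
  set n := li.length with hndef
  -- first_entry as a Nat
  have hf0 : 0 ≤ PySem.Int.mod (page * pagesize) (n : Int) := PySem.Int.mod_nonneg _ hnz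
  have hflt : PySem.Int.mod (page * pagesize) (n : Int) < (n : Int) := PySem.Int.mod_lt _ hnz
  obtain ⟨f, hf⟩ : ∃ f : Nat, PySem.Int.mod (page * pagesize) (n : Int) = (f : Int) :=
    ⟨(PySem.Int.mod (page * pagesize) (n : Int)).toNat, (Int.toNat_of_nonneg hf0).symm⟩
  have hfn : f < n := by exact_mod_cast hf ▸ hflt
  -- pagesize as a Nat
  obtain ⟨q, hq⟩ : ∃ q : Nat, pagesize = (q : Int) :=
    ⟨pagesize.toNat, (Int.toNat_of_nonneg (le_of_lt hps)).symm⟩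
  have hq1 : 1 ≤ q := by exact_mod_cast hq ▸ hps
  -- reps bound
  set a : Int := -(((f : Int)) + pagesize) with hadef
  set fd := PySem.Int.floordiv a (n : Int) with hfddef
  have hmm : fd * (n : Int) + PySem.Int.mod a (n : Int) = a := PySem.Int.floordiv_mul_add_mod a (n : Int)
  have hmd0 : 0 ≤ PySem.Int.mod a (n : Int) := PySem.Int.mod_nonneg _ hnz
  have hrepsn : ((f : Int) + (q : Int)) ≤ (-fd) * (n : Int) := by
    rw [neg_mul]; rw [hq] at hadef; omega
  have hfd0 : 0 < -fd := by
    by_contra hcon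
    have : (-fd) * (n : Int) ≤ 0 := mul_nonpos_iff.mpr (Or.inr ⟨by omega, le_of_lt hnz⟩)
    omega
  obtain ⟨R, hR⟩ : ∃ R : Nat, -fd = (R : Int) := ⟨(-fd).toNat, (Int.toNat_of_nonneg (le_of_lt hfd0)).symm⟩
  have hRn : f + q ≤ R * n := by
    have := hR ▸ hrepsn
    exact_mod_cast this
  have hR1 : 1 ≤ R := by
    rcases Nat.eq_zero_or_pos R with h | h
    · subst h; simp at hRn; omega
    · exact h
  obtain ⟨R', hR'⟩ : ∃ R', R = R' + 1 := ⟨R - 1, by omega⟩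
  subst hR'
  have hRn' : (R' + 1) * n = R' * n + n := by ring
  -- unfold the two ports
  show mockLoopA_loop li (PySem.List.slice li (some (PySem.Int.mod (page * pagesize) (n:Int)))
        (some (min (PySem.Int.mod (page * pagesize) (n:Int) + pagesize) (n : Int))))
        (max 0 (pagesize - (PySem.List.slice li (some (PySem.Int.mod (page * pagesize) (n:Int)))
          (some (min (PySem.Int.mod (page * pagesize) (n:Int) + pagesize) (n : Int)))).length)).toNat
      = PySem.List.slice ((List.replicate (-(PySem.Int.floordiv (-(PySem.Int.mod (page * pagesize) (n:Int) + pagesize)) (n:Int))).toNat li).flatten)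
          (some (PySem.Int.mod (page * pagesize) (n:Int)))
          (some (PySem.Int.mod (page * pagesize) (n:Int) + pagesize))
  rw [hf, hq]
  have hmin : min ((f : Int) + (q : Int)) (n : Int) = ((min (f + q) n : Nat) : Int) := by
    push_cast; omega
  rw [hmin]
  rw [PySem.List.slice_natCast, PySem.List.slice_natCast_add]
  have hfdrw : -(PySem.Int.floordiv (-((f:Int) + (q:Int))) (n:Int)) = ((R' + 1 : Nat) : Int) := by
    rw [← hR, hfddef, hadef, hq]
  rw [hfdrw]
  have hRt : (((R' + 1 : Nat) : Int)).toNat = R' + 1 := rfl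
  rw [hRt]
  -- lengths
  set r : Nat := min (f + q) n - f with hrdef
  have hlen : ((li.drop f).take (min (f + q) n - f)).length = r := by
    simp [List.length_take, List.length_drop]; omega
  have hleft : (max 0 ((q : Int) - (((li.drop f).take (min (f + q) n - f)).length : Int))).toNat = q - r := by
    rw [hlen]; omega
  rw [hleft]
  -- apply the loop characterization with R' copies
  have hqr : q - r ≤ R' * n := by omega
  rw [mockLoopA_loop_eq li hli R' _ _ hqr]
  have hrep : (List.replicate (R' + 1) li).flatten = li ++ (List.replicate R' li).flatten := by
    simp [List.replicate_succ]
  rw [hrep, List.drop_append, List.take_append]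
  have hdn : f - li.length = 0 := by omega
  rw [hdn, List.drop_zero, List.length_drop]
  congr 1
  · -- take r (drop f li) = take q (drop f li)
    rcases Nat.lt_or_ge li.length (f + q) with hcase | hcase
    · have hrl : r = li.length - f := by omega
      rw [hrl, ← List.length_drop, List.take_length,
        List.take_of_length_le (by simp [List.length_drop]; omega)]
    · have : r = q := by omega
      rw [this]
  · -- take (q - r) X = take (q - (n - f)) X
    congr 1
    omega

-- ===== VERDICT (by name: the statement is the Claim_ definition above) =====
theorem mock_loop_list_spec : Claim_equal_mock_loop_list := by
  intro li page pagesize maxsize _hdom hpre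
  obtain ⟨hpage, hps, _, _, hli⟩ := hpre
  exact ports_agree li page pagesize maxsize hpage hps hli
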